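-- pv_equiv track=rewrite | github.com/mental32/ep | src/cogs/pseudo.py | _parse
-- ===== SOURCE A (Python) =====
-- import string
-- import enum
--
-- ascii_letters = string.ascii_letters + '_'
--
-- class TokenTypes(enum.IntEnum):
--     OTHER = 0
--     NAME = 1
--
-- def _parse(source):
--     token = []
--
--     last_bracket = [None]
--     brackets = {
--         ')': '(',
--         ']': '[',
--         '}': '{'
--     }
--
--     # Check for unbalanced brackets before tokenizing
--     for char in source:
--         if char in brackets:
--             if brackets[char] != last_bracket[-1]:
--                 raise SyntaxError(f'Unmatched bracket: "{char}"')
--             else: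
--                 last_bracket.pop()
--
--         elif char in '([{':
--             last_bracket.append(char)
--
--     if last_bracket[-1] is not None:
--         raise SyntaxError(f'Unmatched bracket: "{last_bracket[-1]}"')
--
--     # Begin tokenizing and yielding
--     for char in source:
--         if char not in ascii_letters:
--             if token:
--                 yield ''.join([*token]), TokenTypes.NAME
--                 token = []
--
--             yield char, TokenTypes.OTHER
--
--         else:
--             token += [char]
--
--     if token:
--         yield ''.join([*token]), TokenTypes.NAME
-- ===== SOURCE B (Python) =====
-- import string
-- import enum
-- import re
--
-- ascii_letters = string.ascii_letters + '_'
--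
-- class TokenTypes(enum.IntEnum):
--     OTHER = 0
--     NAME = 1
--
-- def _parse(source):
--     last_bracket = [None]
--     brackets = {
--         ')': '(',
--         ']': '[',
--         '}': '{'
--     }
--
--     # Check for unbalanced brackets before tokenizing (same first pass as A)
--     for char in source:
--         if char in brackets:
--             if brackets[char] != last_bracket[-1]:
--                 raise SyntaxError(f'Unmatched bracket: "{char}"')
--             else:
--                 last_bracket.pop()
--         elif char in '([{':
--             last_bracket.append(char)
--
--     if last_bracket[-1] is not None:
--         raise SyntaxError(f'Unmatched bracket: "{last_bracket[-1]}"')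
--
--     # Tokenize declaratively: maximal letter/_ runs, or single other chars
--     for piece in re.findall(r'[A-Za-z_]+|[^A-Za-z_]', source):
--         if piece[0] in ascii_letters:
--             yield piece, TokenTypes.NAME
--         else:
--             yield piece, TokenTypes.OTHER
-- ===== Notes on version B (the rewrite author's own statement) =====
-- stated objective: idiomatic
-- what changed: The char-by-char tokenizer with a running token list and end-of-loop flush is replaced by a regex findall that discovers maximal [A-Za-z_]+ runs (and single other chars) declaratively (a C-level scan instead of the per-char Python loop); the bracket-balance pass is kept as a separate first pass so SyntaxErrors still precede all yields. Pre_ excludes inputs with unbalanced brackets, on which both A and B raise SyntaxError.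
import Mathlib
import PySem

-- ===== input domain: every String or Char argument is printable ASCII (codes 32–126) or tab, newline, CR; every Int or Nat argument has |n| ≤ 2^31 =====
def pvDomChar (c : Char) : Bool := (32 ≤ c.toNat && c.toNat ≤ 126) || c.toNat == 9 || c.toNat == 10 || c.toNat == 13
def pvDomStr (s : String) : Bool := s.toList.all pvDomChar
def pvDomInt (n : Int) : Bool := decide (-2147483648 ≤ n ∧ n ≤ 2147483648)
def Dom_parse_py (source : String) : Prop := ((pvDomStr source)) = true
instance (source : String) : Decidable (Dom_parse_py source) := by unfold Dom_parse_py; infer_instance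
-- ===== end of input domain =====

-- B replaces A's char-by-char tokenizer (running token list + end-of-loop flush) by splitting the
-- source into maximal letter/_ runs and single other characters (re.findall); same bracket pre-pass.

-- ===== PORT A =====

-- char in ascii_letters  (string.ascii_letters + '_')
def pvIsName (c : Char) : Bool :=
  ('a' ≤ c && c ≤ 'z') || ('A' ≤ c && c ≤ 'Z') || c == '_'

-- A's first pass: last_bracket is a stack (head = Python's last_bracket[-1], bottom element = None,
-- modelled as Option Char entries starting from [none]); returns false exactly where A raises.
-- This pass is textually identical in Source A and Source B, so both ports call this helper.
def pvBracketPass : List Char → List (Option Char) → Bool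
  | [], stk => stk.headD none == none          -- 'if last_bracket[-1] is not None: raise'
  | c :: rest, stk =>
    if c == ')' || c == ']' || c == '}' then
      let opener : Char := if c == ')' then '(' else if c == ']' then '[' else '{'
      if (some opener : Option Char) ≠ stk.headD none then false   -- raise SyntaxError
      else pvBracketPass rest stk.tail                              -- last_bracket.pop()
    else if c == '(' || c == '[' || c == '{' then
      pvBracketPass rest (some c :: stk)                            -- last_bracket.append(char)
    else pvBracketPass rest stk

-- A's second pass: running `token` list, flushed when a non-letter is met and at the end.
def pvLoopA : List Char → List Char → List (String × Int)
  | [], token => if token.isEmpty then [] else [(String.ofList token, (1 : Int))]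
  | c :: rest, token =>
    if pvIsName c then
      pvLoopA rest (token ++ [c])                                   -- token += [char]
    else
      (if token.isEmpty then [] else [(String.ofList token, (1 : Int))])
        ++ (String.ofList [c], (0 : Int)) :: pvLoopA rest []

-- value = [] is unreachable under Pre_: it stands for the SyntaxError branch
def parse_py (source : String) : List (String × Int) :=
  if pvBracketPass source.toList [none] then pvLoopA source.toList [] else []

-- ===== PORT B =====

-- re.findall(r'[A-Za-z_]+|[^A-Za-z_]', source), each piece tagged NAME/OTHER by its first char
def pvPieces : List Char → List (String × Int)
  | [] => []
  | c :: rest =>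
    if pvIsName c then
      (String.ofList (c :: rest.takeWhile pvIsName), (1 : Int)) :: pvPieces (rest.dropWhile pvIsName)
    else
      (String.ofList [c], (0 : Int)) :: pvPieces rest
termination_by cs => cs.length
decreasing_by
  · simpa using Nat.lt_succ_of_le (List.length_dropWhile_le pvIsName rest)
  · simp

def parse_py_alt (source : String) : List (String × Int) :=
  if pvBracketPass source.toList [none] then pvPieces source.toList else []

-- ===== PRECONDITION & SPEC =====
-- Pre_ excludes exactly the inputs with unbalanced brackets, on which A (and B) raise SyntaxError.
-- Standard balancedness: stack of expected closing brackets.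
def pvBalanced : List Char → List Char → Bool
  | [], stk => stk.isEmpty
  | c :: rest, stk =>
    if c = '(' then pvBalanced rest (')' :: stk)
    else if c = '[' then pvBalanced rest (']' :: stk)
    else if c = '{' then pvBalanced rest ('}' :: stk)
    else if c = ')' ∨ c = ']' ∨ c = '}' then
      match stk with
      | t :: stk' => if c = t then pvBalanced rest stk' else false
      | [] => false
    else pvBalanced rest stk

def Pre_parse_py (source : String) : Prop := pvBalanced source.toList [] = true
instance (source : String) : Decidable (Pre_parse_py source) := by unfold Pre_parse_py; infer_instance

def pvWitness_parse_py : String := "f(x[1]) + {y}_z"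

def Spec_parse_py (source : String) (out : List (String × Int)) : Prop := out = parse_py_alt source
instance (source : String) (out : List (String × Int)) : Decidable (Spec_parse_py source out) := by unfold Spec_parse_py; infer_instance

-- ===== CLAIM (what is proved, stated in full; the proofs are below) =====
def Claim_equal_parse_py : Prop := ∀ (source : String), Dom_parse_py source → Pre_parse_py source → Spec_parse_py source (parse_py source)

-- ===== LEMMAS AND PROOFS =====

-- A's accumulator loop, run with pending token `token`, equals "merge token into the first piece".
theorem pvLoopA_eq_pieces (cs : List Char) : ∀ token : List Char,
    pvLoopA cs token =
      if token.isEmpty then pvPieces cs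
      else (String.ofList (token ++ cs.takeWhile pvIsName), (1 : Int)) :: pvPieces (cs.dropWhile pvIsName) := by
  induction cs with
  | nil =>
    intro token
    cases token <;> simp [pvLoopA, pvPieces]
  | cons c rest ih =>
    intro token
    by_cases hc : pvIsName c
    · cases token with
      | nil =>
        simp [pvLoopA, hc, pvPieces, ih [c]]
      | cons t ts =>
        simp only [pvLoopA, hc, if_true, List.takeWhile_cons, List.dropWhile_cons,
          List.cons_append, ih (t :: (ts ++ [c]))]
        simp
    · cases token with
      | nil =>
        simp [pvLoopA, hc, pvPieces, ih []]
      | cons t ts =>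
        simp [pvLoopA, hc, pvPieces, ih []]

-- ===== VERDICT (by name: the statement is the Claim_ definition above) =====
theorem parse_py_spec : Claim_equal_parse_py := by
  intro source _ _
  unfold Spec_parse_py parse_py parse_py_alt
  split
  · simpa using pvLoopA_eq_pieces source.toList []
  · rfl
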